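-- pv_equiv track=rewrite | github.com/shruti17s/tesseract_test | tesseract.py | getDLInfo
-- ===== SOURCE A (Python) =====
-- def getAppendedString(l, start):
--   s = ""
--   for i in range(start, len(l)):
--     s+=(l[i] +  ('' if i == len(l)-1 else " "))
--   return s
--
-- def getDLInfo(data):
--   info = {}
--   for line in data.split("\n"):
--     if line not in ['', '  ', ' ', '    ', '   ']:
--       l = line.split(" ")
--       if len(l) >= 2 and l[0] in ['1.', '1', '1,','i.']:
--         info['lastName'] = getAppendedString(l, 1)
--       if len(l) >= 2 and l[0] in ['2.', '2', '2,','_2']: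
--         info['firstName'] = getAppendedString(l, 1)
--       if len(l) >= 2 and l[0] in ['3.', '3', '3,','39']:
--         info['dob'] = l[1]
--       if len(l) >= 2 and l[0] in ['5.', '5', '5,','e =i','_','eH']:
--         info['dlNo'] = getAppendedString(l, 1)
--   return info
-- ===== SOURCE B (Python) =====
-- _FIELDS = [('lastName', ('1.', '1', '1,', 'i.'), True),
--            ('firstName', ('2.', '2', '2,', '_2'), True),
--            ('dob', ('3.', '3', '3,', '39'), False),
--            ('dlNo', ('5.', '5', '5,', 'e =i', '_', 'eH'), True)]
--
-- def getDLInfo(data):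
--     # pass 1: turn the raw text into a flat list of (field, value) events
--     events = []
--     for line in data.split('\n'):
--         if line in ('', '  ', ' ', '    ', '   '):
--             continue
--         l = line.split(' ')
--         if len(l) < 2:
--             continue
--         for field, toks, join in _FIELDS:
--             if l[0] in toks:
--                 events.append((field, ' '.join(l[1:]) if join else l[1]))
--                 break
--     # pass 2: keys in first-occurrence order, each mapped to its last event's value
--     order = dict.fromkeys(f for f, _ in events)
--     return {k: [v for f, v in events if f == k][-1] for k in order}
-- ===== Notes on version B (the rewrite author's own statement) =====
-- stated objective: alternative
-- what changed: A makes one pass that mutates a dict through four parallel membership-test branches (each rebuilding the value by an index-loop string append); B is staged: pass 1 reduces the text to a flat (field, value) event list via a dispatch over a field table, pass 2 assembles the result from the first-occurrence key order (dict.fromkeys) by taking each key's last event value, never maintaining a dict during the scan.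
import Mathlib
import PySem

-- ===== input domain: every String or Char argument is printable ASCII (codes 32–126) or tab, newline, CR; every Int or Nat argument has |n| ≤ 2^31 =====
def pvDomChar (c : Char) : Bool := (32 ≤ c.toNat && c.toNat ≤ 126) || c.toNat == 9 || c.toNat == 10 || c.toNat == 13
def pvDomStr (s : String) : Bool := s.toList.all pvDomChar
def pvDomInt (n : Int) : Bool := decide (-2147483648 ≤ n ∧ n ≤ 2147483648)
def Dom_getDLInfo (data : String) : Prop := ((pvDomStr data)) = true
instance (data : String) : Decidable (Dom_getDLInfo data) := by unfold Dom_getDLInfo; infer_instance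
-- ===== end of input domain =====

-- B restages A's single dict-mutating pass as two passes: extract a flat (field, value)
-- event list by a table dispatch, then assemble keys in first-occurrence order with each
-- key's last event value; objective: alternative (same asymptotic cost).

-- ===== PORT A =====
-- getAppendedString(l, start): index loop over range(start, len(l)), accumulating
-- l[i] plus a space except after the last element (accumulator carried as List Char,
-- String.ofList at the end; exact for Python's str concatenation).
def pvGAS (l : List String) (start : Int) : String :=
  String.ofList ((PySem.List.pyRange start (l.length : Int) 1).foldl
    (fun s i =>
      s ++ (PySem.List.pyGetD l i "").toList ++
        (if i = (l.length : Int) - 1 then [] else [' '])) [])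

def getDLInfo (data : String) : List (String × String) :=
  (((PySem.Str.split? data "\n").getD []).foldl
    (fun info line =>
      if line ∈ (["", "  ", " ", "    ", "   "] : List String) then info
      else
        let l := (PySem.Str.split? line " ").getD []
        let info :=
          if 2 ≤ l.length ∧ PySem.List.pyGetD l 0 "" ∈ (["1.", "1", "1,", "i."] : List String) then
            info.insert "lastName" (pvGAS l 1) else info
        let info :=
          if 2 ≤ l.length ∧ PySem.List.pyGetD l 0 "" ∈ (["2.", "2", "2,", "_2"] : List String) then
            info.insert "firstName" (pvGAS l 1) else info
        let info :=
          if 2 ≤ l.length ∧ PySem.List.pyGetD l 0 "" ∈ (["3.", "3", "3,", "39"] : List String) then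
            info.insert "dob" (PySem.List.pyGetD l 1 "") else info
        let info :=
          if 2 ≤ l.length ∧ PySem.List.pyGetD l 0 "" ∈ (["5.", "5", "5,", "e =i", "_", "eH"] : List String) then
            info.insert "dlNo" (pvGAS l 1) else info
        info)
    PySem.Dict.empty).items

-- ===== PORT B =====
-- the field table: (field name, accepted prefix tokens, join-mode? true = ' '.join(l[1:]), false = l[1])
def pvFields : List (String × List String × Bool) :=
  [("lastName", (["1.", "1", "1,", "i."], true)),
   ("firstName", (["2.", "2", "2,", "_2"], true)),
   ("dob", (["3.", "3", "3,", "39"], false)),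
   ("dlNo", (["5.", "5", "5,", "e =i", "_", "eH"], true))]

-- the inner 'for field, toks, join in _FIELDS: if l[0] in toks: …; break' loop
def pvDispatch (tok : String) : List (String × List String × Bool) → Option (String × Bool)
  | [] => none
  | (f, toks, j) :: rest => if tok ∈ toks then some (f, j) else pvDispatch tok rest

def getDLInfo_alt (data : String) : List (String × String) :=
  -- pass 1: the flat event list
  let events := ((PySem.Str.split? data "\n").getD []).foldl
    (fun evs line =>
      if line ∈ (["", "  ", " ", "    ", "   "] : List String) then evs
      else
        let l := (PySem.Str.split? line " ").getD []
        if l.length < 2 then evs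
        else
          match pvDispatch (PySem.List.pyGetD l 0 "") pvFields with
          | none => evs
          | some (f, j) =>
              evs ++ [(f, if j then PySem.Str.join " " (l.drop 1) else PySem.List.pyGetD l 1 "")]) []
  -- pass 2: dict.fromkeys = PySem.List.dedup; per key, the last matching event's value ([-1])
  let order := PySem.List.dedup (events.map Prod.fst)
  (order.foldl
    (fun d k =>
      d.insert k (PySem.List.pyGetD ((events.filter (fun p => p.1 == k)).map Prod.snd) (-1) ""))
    PySem.Dict.empty).items

-- ===== PRECONDITION & SPEC =====
def Spec_getDLInfo (data : String) (out : List (String × String)) : Prop := out = getDLInfo_alt data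
instance (data : String) (out : List (String × String)) : Decidable (Spec_getDLInfo data out) := by unfold Spec_getDLInfo; infer_instance

-- ===== CLAIM (what is proved, stated in full; the proofs are below) =====
def Claim_equal_getDLInfo : Prop := ∀ (data : String), Dom_getDLInfo data → Spec_getDLInfo data (getDLInfo data)

-- ===== LEMMAS AND PROOFS =====

-- the (field, value) event a single line contributes, if any (proof-side characterisation)
def pvEvent? (line : String) : Option (String × String) :=
  if line ∈ (["", "  ", " ", "    ", "   "] : List String) then none
  else
    let l := (PySem.Str.split? line " ").getD []
    if l.length < 2 then none
    else
      (pvDispatch (PySem.List.pyGetD l 0 "") pvFields).map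
        (fun fj => (fj.1, if fj.2 then PySem.Str.join " " (l.drop 1) else PySem.List.pyGetD l 1 ""))

-- A's append loop from index a equals the ' '-join of the tail from a.
theorem pvGAS_join (l : List String) : ∀ (n a : Nat) (acc : List Char),
    l.length - a = n → a < l.length →
    (PySem.List.pyRange (a : Int) (l.length : Int) 1).foldl
      (fun s i =>
        s ++ (PySem.List.pyGetD l i "").toList ++
          (if i = (l.length : Int) - 1 then [] else [' '])) acc
      = acc ++ PySem.Chars.join [' '] ((l.drop a).map String.toList) := by
  intro n
  induction n with
  | zero => intro a acc hn ha; omega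
  | succ n ih =>
    intro a acc hn ha
    have hlt : (a : Int) < (l.length : Int) := by exact_mod_cast ha
    rw [PySem.List.pyRange_one_cons hlt]
    have hget : PySem.List.pyGetD l (a : Int) "" = l[a] := by
      rw [PySem.List.pyGetD_natCast]; exact List.getD_eq_getElem l "" ha
    by_cases hlast : a + 1 = l.length
    · have heq : (a : Int) = (l.length : Int) - 1 := by omega
      have hr : PySem.List.pyRange ((a : Int) + 1) (l.length : Int) 1 = [] :=
        PySem.List.pyRange_one_eq_nil (by omega)
      have hd : l.drop a = [l[a]] := by
        rw [List.drop_eq_getElem_cons ha, List.drop_eq_nil_of_le (by omega)]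
      simp only [List.foldl_cons, hr, List.foldl_nil, hd, List.map_cons, List.map_nil,
        PySem.Chars.join_singleton]
      rw [hget, if_pos heq]
      simp
    · have hlt2 : a + 1 < l.length := by omega
      have hne : ¬ ((a : Int) = (l.length : Int) - 1) := by omega
      have hcast : ((a : Int) + 1) = (((a + 1 : Nat)) : Int) := by push_cast; ring
      simp only [List.foldl_cons, hget, if_neg hne, hcast]
      rw [ih (a + 1) (acc ++ l[a].toList ++ [' ']) (by omega) hlt2]
      have hd : l.drop a = l[a] :: l.drop (a + 1) := List.drop_eq_getElem_cons ha
      have hne2 : l.drop (a + 1) ≠ [] := by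
        intro h
        have := congrArg List.length h
        simp [List.length_drop] at this
        omega
      obtain ⟨x, xs, hx⟩ := List.exists_cons_of_ne_nil hne2
      rw [hd, hx]
      simp only [List.map_cons, PySem.Chars.join_cons_cons]
      simp [List.append_assoc]

theorem pvGAS_eq (l : List String) (h : 2 ≤ l.length) :
    pvGAS l 1 = PySem.Str.join " " (l.drop 1) := by
  unfold pvGAS
  have hj := pvGAS_join l (l.length - 1) 1 [] (by omega) (by omega)
  simp only [Nat.cast_one] at hj
  rw [hj]
  conv_rhs => rw [← String.ofList_toList (s := PySem.Str.join " " (l.drop 1))]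
  rw [PySem.Str.toList_join]
  simp

-- A's four sequential branch-updates on one line are exactly one insert of that line's event.
theorem stepA_eq (info : PySem.Dict String String) (line : String) :
    (if line ∈ (["", "  ", " ", "    ", "   "] : List String) then info
      else
        let l := (PySem.Str.split? line " ").getD []
        let info :=
          if 2 ≤ l.length ∧ PySem.List.pyGetD l 0 "" ∈ (["1.", "1", "1,", "i."] : List String) then
            info.insert "lastName" (pvGAS l 1) else info
        let info :=
          if 2 ≤ l.length ∧ PySem.List.pyGetD l 0 "" ∈ (["2.", "2", "2,", "_2"] : List String) then
            info.insert "firstName" (pvGAS l 1) else info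
        let info :=
          if 2 ≤ l.length ∧ PySem.List.pyGetD l 0 "" ∈ (["3.", "3", "3,", "39"] : List String) then
            info.insert "dob" (PySem.List.pyGetD l 1 "") else info
        let info :=
          if 2 ≤ l.length ∧ PySem.List.pyGetD l 0 "" ∈ (["5.", "5", "5,", "e =i", "_", "eH"] : List String) then
            info.insert "dlNo" (pvGAS l 1) else info
        info)
    = (match pvEvent? line with
       | none => info
       | some (k, v) => info.insert k v) := by
  unfold pvEvent?
  by_cases hs : line ∈ (["", "  ", " ", "    ", "   "] : List String)
  · rw [if_pos hs, if_pos hs]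
  · rw [if_neg hs, if_neg hs]
    simp only []
    set l := (PySem.Str.split? line " ").getD [] with hl
    by_cases hlen : l.length < 2
    · rw [if_pos hlen,
        if_neg (fun h => absurd h.1 (by omega)),
        if_neg (fun h => absurd h.1 (by omega)),
        if_neg (fun h => absurd h.1 (by omega)),
        if_neg (fun h => absurd h.1 (by omega))]
    · have hlen' : 2 ≤ l.length := by omega
      have hval : pvGAS l 1 = PySem.Str.join " " (l.drop 1) := pvGAS_eq l hlen'
      rw [if_neg hlen]
      generalize PySem.List.pyGetD l 0 "" = t
      by_cases m1 : t ∈ (["1.", "1", "1,", "i."] : List String)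
      · have m1' := m1
        simp only [List.mem_cons, List.not_mem_nil, or_false] at m1'
        have hg : pvDispatch t pvFields = some ("lastName", true) := by
          rcases m1' with rfl | rfl | rfl | rfl <;> rfl
        have n2 : t ∉ (["2.", "2", "2,", "_2"] : List String) := by
          rcases m1' with rfl | rfl | rfl | rfl <;> decide
        have n3 : t ∉ (["3.", "3", "3,", "39"] : List String) := by
          rcases m1' with rfl | rfl | rfl | rfl <;> decide
        have n4 : t ∉ (["5.", "5", "5,", "e =i", "_", "eH"] : List String) := by
          rcases m1' with rfl | rfl | rfl | rfl <;> decide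
        rw [if_neg (fun h => n4 h.2), if_neg (fun h => n3 h.2), if_neg (fun h => n2 h.2),
          if_pos ⟨hlen', m1⟩, hg]
        simp [hval]
      by_cases m2 : t ∈ (["2.", "2", "2,", "_2"] : List String)
      · have m2' := m2
        simp only [List.mem_cons, List.not_mem_nil, or_false] at m2'
        have hg : pvDispatch t pvFields = some ("firstName", true) := by
          rcases m2' with rfl | rfl | rfl | rfl <;> rfl
        have n3 : t ∉ (["3.", "3", "3,", "39"] : List String) := by
          rcases m2' with rfl | rfl | rfl | rfl <;> decide
        have n4 : t ∉ (["5.", "5", "5,", "e =i", "_", "eH"] : List String) := by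
          rcases m2' with rfl | rfl | rfl | rfl <;> decide
        rw [if_neg (fun h => n4 h.2), if_neg (fun h => n3 h.2), if_pos ⟨hlen', m2⟩,
          if_neg (fun h => m1 h.2), hg]
        simp [hval]
      by_cases m3 : t ∈ (["3.", "3", "3,", "39"] : List String)
      · have m3' := m3
        simp only [List.mem_cons, List.not_mem_nil, or_false] at m3'
        have hg : pvDispatch t pvFields = some ("dob", false) := by
          rcases m3' with rfl | rfl | rfl | rfl <;> rfl
        have n4 : t ∉ (["5.", "5", "5,", "e =i", "_", "eH"] : List String) := by
          rcases m3' with rfl | rfl | rfl | rfl <;> decide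
        rw [if_neg (fun h => n4 h.2), if_pos ⟨hlen', m3⟩, if_neg (fun h => m2 h.2),
          if_neg (fun h => m1 h.2), hg]
        simp
      by_cases m4 : t ∈ (["5.", "5", "5,", "e =i", "_", "eH"] : List String)
      · have m4' := m4
        simp only [List.mem_cons, List.not_mem_nil, or_false] at m4'
        have hg : pvDispatch t pvFields = some ("dlNo", true) := by
          rcases m4' with rfl | rfl | rfl | rfl | rfl | rfl <;> rfl
        rw [if_pos ⟨hlen', m4⟩, if_neg (fun h => m3 h.2), if_neg (fun h => m2 h.2),
          if_neg (fun h => m1 h.2), hg]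
        simp [hval]
      · have hg : pvDispatch t pvFields = none := by
          unfold pvDispatch pvFields
          simp only []
          rw [if_neg m1]
          unfold pvDispatch
          rw [if_neg m2]
          unfold pvDispatch
          rw [if_neg m3]
          unfold pvDispatch
          rw [if_neg m4]
          rfl
        rw [if_neg (fun h => m4 h.2), if_neg (fun h => m3 h.2), if_neg (fun h => m2 h.2),
          if_neg (fun h => m1 h.2), hg]
        rfl

-- B's per-line step appends exactly that line's event.
theorem stepB_eq (evs : List (String × String)) (line : String) :
    (if line ∈ (["", "  ", " ", "    ", "   "] : List String) then evs
      else
        let l := (PySem.Str.split? line " ").getD []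
        if l.length < 2 then evs
        else
          match pvDispatch (PySem.List.pyGetD l 0 "") pvFields with
          | none => evs
          | some (f, j) =>
              evs ++ [(f, if j then PySem.Str.join " " (l.drop 1) else PySem.List.pyGetD l 1 "")])
    = (match pvEvent? line with
       | none => evs
       | some e => evs ++ [e]) := by
  unfold pvEvent?
  by_cases hs : line ∈ (["", "  ", " ", "    ", "   "] : List String)
  · rw [if_pos hs, if_pos hs]
  · rw [if_neg hs, if_neg hs]
    simp only []
    set l := (PySem.Str.split? line " ").getD [] with hl
    by_cases hlen : l.length < 2
    · rw [if_pos hlen, if_pos hlen]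
    · rw [if_neg hlen, if_neg hlen]
      cases pvDispatch (PySem.List.pyGetD l 0 "") pvFields with
      | none => rfl
      | some fj => cases fj; rfl

-- folding the per-event insert over all lines = folding it over the event list
theorem foldA_filterMap (lines : List String) :
    ∀ (d : PySem.Dict String String),
    lines.foldl (fun d line =>
      match pvEvent? line with
      | none => d
      | some (k, v) => d.insert k v) d
    = (lines.filterMap pvEvent?).foldl (fun d p => d.insert p.1 p.2) d := by
  induction lines with
  | nil => intro d; rfl
  | cons line rest ih =>
    intro d
    simp only [List.foldl_cons, List.filterMap_cons]
    cases h : pvEvent? line with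
    | none => exact ih d
    | some e => cases e; simp only [List.foldl_cons]; exact ih _

-- the append loop over all lines builds exactly the event list
theorem foldB_filterMap (lines : List String) :
    ∀ (acc : List (String × String)),
    lines.foldl (fun evs line =>
      match pvEvent? line with
      | none => evs
      | some e => evs ++ [e]) acc
    = acc ++ lines.filterMap pvEvent? := by
  induction lines with
  | nil => intro acc; simp
  | cons line rest ih =>
    intro acc
    simp only [List.foldl_cons, List.filterMap_cons]
    cases h : pvEvent? line with
    | none => simp [ih]
    | some e => simp [ih, List.append_assoc]

-- the dict built by folding inserts holds, at each occurring key, the LAST event's value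
theorem getD_foldl_insert_last (es : List (String × String)) (k : String)
    (h : k ∈ es.map Prod.fst) :
    (es.foldl (fun d p => d.insert p.1 p.2) PySem.Dict.empty).getD k ""
      = PySem.List.pyGetD ((es.filter (fun p => p.1 == k)).map Prod.snd) (-1) "" := by
  induction es using List.reverseRecOn with
  | nil => simp at h
  | append_singleton es p ih =>
    obtain ⟨k', v⟩ := p
    rw [List.foldl_append, List.foldl_cons, List.foldl_nil, PySem.Dict.getD_insert]
    by_cases hk : k = k'
    · subst hk
      rw [if_pos rfl, List.filter_append]
      simp only [List.filter_cons, List.filter_nil, beq_self_eq_true, if_pos]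
      simp only [List.map_append, List.map_cons, List.map_nil]
      rw [PySem.List.pyGetD_neg_one_append_singleton]
    · rw [if_neg hk, List.filter_append]
      have hne : ((k', v).1 == k) = false := by simp [beq_eq_false_iff_ne]; exact fun h' => hk h'.symm
      simp only [List.filter_cons, List.filter_nil, hne]
      simp only [Bool.false_eq_true, if_false, List.append_nil]
      apply ih
      simp only [List.map_append, List.mem_append, List.map_cons, List.map_nil,
        List.mem_cons, List.not_mem_nil, or_false] at h
      rcases h with h | h
      · exact h
      · exact absurd h hk

-- ===== VERDICT (by name: the statement is the Claim_ definition above) =====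
theorem getDLInfo_spec : Claim_equal_getDLInfo := by
  intro data _
  unfold Spec_getDLInfo getDLInfo getDLInfo_alt
  set lines := (PySem.Str.split? data "\n").getD [] with hlines
  set es := lines.filterMap pvEvent? with hes
  -- rewrite both folds into event form
  have hA : (lines.foldl
      (fun info line =>
        if line ∈ (["", "  ", " ", "    ", "   "] : List String) then info
        else
          let l := (PySem.Str.split? line " ").getD []
          let info :=
            if 2 ≤ l.length ∧ PySem.List.pyGetD l 0 "" ∈ (["1.", "1", "1,", "i."] : List String) then
              info.insert "lastName" (pvGAS l 1) else info
          let info :=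
            if 2 ≤ l.length ∧ PySem.List.pyGetD l 0 "" ∈ (["2.", "2", "2,", "_2"] : List String) then
              info.insert "firstName" (pvGAS l 1) else info
          let info :=
            if 2 ≤ l.length ∧ PySem.List.pyGetD l 0 "" ∈ (["3.", "3", "3,", "39"] : List String) then
              info.insert "dob" (PySem.List.pyGetD l 1 "") else info
          let info :=
            if 2 ≤ l.length ∧ PySem.List.pyGetD l 0 "" ∈ (["5.", "5", "5,", "e =i", "_", "eH"] : List String) then
              info.insert "dlNo" (pvGAS l 1) else info
          info)
      PySem.Dict.empty)
      = es.foldl (fun d p => d.insert p.1 p.2) PySem.Dict.empty := by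
    rw [← foldA_filterMap]
    congr 1
    funext info line
    exact stepA_eq info line
  have hB : (lines.foldl
      (fun evs line =>
        if line ∈ (["", "  ", " ", "    ", "   "] : List String) then evs
        else
          let l := (PySem.Str.split? line " ").getD []
          if l.length < 2 then evs
          else
            match pvDispatch (PySem.List.pyGetD l 0 "") pvFields with
            | none => evs
            | some (f, j) =>
                evs ++ [(f, if j then PySem.Str.join " " (l.drop 1) else PySem.List.pyGetD l 1 "")])
      []) = es := by
    have : (fun (evs : List (String × String)) line =>
        if line ∈ (["", "  ", " ", "    ", "   "] : List String) then evs
        else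
          let l := (PySem.Str.split? line " ").getD []
          if l.length < 2 then evs
          else
            match pvDispatch (PySem.List.pyGetD l 0 "") pvFields with
            | none => evs
            | some (f, j) =>
                evs ++ [(f, if j then PySem.Str.join " " (l.drop 1) else PySem.List.pyGetD l 1 "")])
        = (fun evs line => match pvEvent? line with
           | none => evs
           | some e => evs ++ [e]) := by
      funext evs line
      exact stepB_eq evs line
    rw [this, foldB_filterMap]
    rw [List.nil_append]
  simp only [hA, hB]
  -- A side: items of the event fold, via its keys
  have hkeys : (es.foldl (fun d p => d.insert p.1 p.2) PySem.Dict.empty).keys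
      = PySem.List.dedup (es.map Prod.fst) := by
    rw [PySem.Dict.keys_foldl_insert_key es Prod.fst (fun d p => p.2) PySem.Dict.empty]
    rw [PySem.Dict.keys_empty, PySem.Set.update_nil_left, PySem.List.dedup_eq_ofList]
  have hnodup : (es.foldl (fun d p => d.insert p.1 p.2) PySem.Dict.empty).keys.Nodup :=
    PySem.Dict.nodup_keys_foldl_insert_key es Prod.fst (fun d p => p.2) PySem.Dict.empty
      PySem.Dict.nodup_keys_empty
  rw [PySem.Dict.items_eq_map_keys _ hnodup "", hkeys]
  -- B side: fresh distinct keys append in order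
  have hfresh : ((PySem.List.dedup (es.map Prod.fst)).foldl
      (fun d k =>
        d.insert k (PySem.List.pyGetD ((es.filter (fun p => p.1 == k)).map Prod.snd) (-1) ""))
      PySem.Dict.empty).items
      = PySem.Dict.empty.items ++ (PySem.List.dedup (es.map Prod.fst)).map
          (fun k => (k, PySem.List.pyGetD ((es.filter (fun p => p.1 == k)).map Prod.snd) (-1) "")) := by
    apply PySem.Dict.items_foldl_insert_fresh
    · intro a _
      exact PySem.Dict.contains_empty a
    · have : List.map (fun k => k) (PySem.List.dedup (es.map Prod.fst))
          = PySem.List.dedup (es.map Prod.fst) := List.map_id' _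
      rw [this]
      exact PySem.List.nodup_dedup (es.map Prod.fst)
  rw [hfresh]
  rw [show PySem.Dict.empty.items = ([] : List (String × String)) from rfl, List.nil_append]
  apply List.map_congr_left
  intro k hk
  have hk' : k ∈ es.map Prod.fst := (PySem.List.mem_dedup _ _).mp hk
  rw [getD_foldl_insert_last es k hk']
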